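-- pv_equiv track=rewrite | github.com/nickycheng4/Digital-Distributed-IoT-Assistant | code/utils/mappings.py | trigger_condition
-- ===== SOURCE A (Python) =====
-- trigger_device = {
--     "TV": [],
--     "AC": [''],
--     "drone": [],
--     "speaker": ['sound'],
--     'light':['brightness'],
--     'tank':[],
--     'door':[],
--     'camera':['see']
-- }
--
-- def trigger_condition(command):
--     result_device = None
--     result_target = None
--     redun = ['is','the','really']
--     if command[-1] != 'No condition':
--
--         words = command[-1].split()
--         for i in range(len(words)):
--             for device in trigger_device:
--                 if words[i] in trigger_device[device] or words[i] == device: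
--                     result_device = device.capitalize()
--                     result_target = ' '.join([item for item in words[i+1:] if item not in redun]).capitalize()
--
--     return result_device, result_target
-- ===== SOURCE B (Python) =====
-- trigger_device = {
--     "TV": [],
--     "AC": [''],
--     "drone": [],
--     "speaker": ['sound'],
--     'light':['brightness'],
--     'tank':[],
--     'door':[],
--     'camera':['see']
-- }
--
-- def trigger_condition(command):
--     # Scan words back-to-front and stop at the first (i.e. last) matching word,
--     # instead of sweeping forward and overwriting the result on every match.
--     redun = ('is', 'the', 'really')
--     if command[-1] == 'No condition':
--         return None, None
--     words = command[-1].split()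
--     for i in range(len(words) - 1, -1, -1):
--         w = words[i]
--         match = None
--         for device, triggers in trigger_device.items():
--             if w == device or w in triggers:
--                 match = device
--         if match is not None:
--             target = ' '.join(x for x in words[i+1:] if x not in redun)
--             return match.capitalize(), target.capitalize()
--     return None, None
-- ===== Notes on version B (the rewrite author's own statement) =====
-- stated objective: alternative
-- what changed: B scans word indices backwards and returns at the first (i.e. last) matching word, computing the last matching device for that word once, instead of A's forward sweep that overwrites result_device/result_target on every match; Pre_ excludes only the empty command list, on which A's command[-1] raises IndexError (B raises there too).
import Mathlib
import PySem

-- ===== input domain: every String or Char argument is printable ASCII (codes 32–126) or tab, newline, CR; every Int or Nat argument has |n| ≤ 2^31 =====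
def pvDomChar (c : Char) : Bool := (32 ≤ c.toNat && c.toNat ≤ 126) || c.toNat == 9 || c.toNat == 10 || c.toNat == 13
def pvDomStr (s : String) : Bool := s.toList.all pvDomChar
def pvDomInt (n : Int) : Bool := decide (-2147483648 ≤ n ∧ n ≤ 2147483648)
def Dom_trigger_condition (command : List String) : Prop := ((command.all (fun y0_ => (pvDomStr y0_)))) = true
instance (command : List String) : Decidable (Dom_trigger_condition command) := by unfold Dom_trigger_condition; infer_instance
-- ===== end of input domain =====

-- B scans the words back-to-front and stops at the first (= last) matching word instead of
-- sweeping forward and overwriting the result on every match (objective: alternative).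

-- the module-level dict trigger_device, as an association list in insertion order
def pyTriggerDevice : List (String × List String) :=
  [("TV", []), ("AC", [""]), ("drone", []), ("speaker", ["sound"]),
   ("light", ["brightness"]), ("tank", []), ("door", []), ("camera", ["see"])]

-- str.capitalize(): first char uppercased, rest lowercased (exact on ASCII)
def pyCapitalize (s : String) : String :=
  match s.toList with
  | [] => ""
  | c :: rest => String.ofList (PySem.Chars.upperChar c :: rest.map PySem.Chars.lowerChar)

-- ===== PORT A =====
def trigger_condition (command : List String) : Option String × Option String :=
  let redun : List String := ["is", "the", "really"]
  match PySem.List.pyGet? command (-1) with   -- command[-1]: IndexError on [], excluded by Pre_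
  | none => (none, none)
  | some last =>
    if last ≠ "No condition" then
      let words := PySem.Str.split₀ last
      (List.range words.length).foldl
        (fun res i =>
          pyTriggerDevice.foldl
            (fun res p =>
              if p.2.contains (words.getD i "") || words.getD i "" == p.1 then
                (some (pyCapitalize p.1),
                 some (pyCapitalize (PySem.Str.join " "
                   ((words.drop (i + 1)).filter (fun item => !redun.contains item)))))
                   -- words[i+1:] with i+1 ≥ 0 is drop (i+1)
              else res)
            res)
        ((none : Option String), (none : Option String))
    else (none, none)

-- ===== PORT B =====
-- inner loop of B: last device (in dict order) whose name is w or whose trigger list has w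
def lastMatch (w : String) : Option String :=
  pyTriggerDevice.foldl (fun m p => if w == p.1 || p.2.contains w then some p.1 else m) none

-- B's backward loop: scanBack words (i+1) looks at word index i, recursing on no match
def scanBack (words : List String) : Nat → Option String × Option String
  | 0 => (none, none)
  | i + 1 =>
    match lastMatch (words.getD i "") with
    | some dev =>
        (some (pyCapitalize dev),
         some (pyCapitalize (PySem.Str.join " "
           ((words.drop (i + 1)).filter (fun x => !(["is", "the", "really"] : List String).contains x)))))
    | none => scanBack words i

def trigger_condition_alt (command : List String) : Option String × Option String :=
  match PySem.List.pyGet? command (-1) with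
  | none => (none, none)
  | some last =>
    if last == "No condition" then (none, none)
    else
      let words := PySem.Str.split₀ last
      scanBack words words.length

-- ===== PRECONDITION & SPEC =====
-- Pre_ excludes only the empty command list, on which A's command[-1] raises IndexError.
def Pre_trigger_condition (command : List String) : Prop := command ≠ []
instance (command : List String) : Decidable (Pre_trigger_condition command) := by unfold Pre_trigger_condition; infer_instance
def pvWitness_trigger_condition : List String := ["turn on the speaker sound"]

def Spec_trigger_condition (command : List String) (out : Option String × Option String) : Prop := out = trigger_condition_alt command
instance (command : List String) (out : Option String × Option String) : Decidable (Spec_trigger_condition command out) := by unfold Spec_trigger_condition; infer_instance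

-- ===== CLAIM (what is proved, stated in full; the proofs are below) =====
def Claim_equal_trigger_condition : Prop := ∀ (command : List String), Dom_trigger_condition command → Pre_trigger_condition command → Spec_trigger_condition command (trigger_condition command)

-- ===== LEMMAS AND PROOFS =====

-- last-overwrite chooser: the accumulator only survives if no later element matches
theorem chooser_acc {α : Type} (cond : α → Bool) (g : α → String)
    (L : List α) (a : Option String) :
    L.foldl (fun m p => if cond p then some (g p) else m) a
      = match L.foldl (fun m p => if cond p then some (g p) else m) none with
        | some d => some d
        | none => a := by
  induction L generalizing a with
  | nil => simp
  | cons p L ih =>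
    simp only [List.foldl]
    rw [ih, ih (if cond p then some (g p) else none)]
    cases h : L.foldl (fun m p => if cond p then some (g p) else m) none
    · cases hb : cond p <;> simp
    · simp

-- a keep-last overwrite fold equals "apply mk to the last matching element, else init"
theorem overwrite_eq_lastMatch {α : Type} (condA condB : α → Bool)
    (hcond : ∀ p, condA p = condB p) (g : α → String)
    (mk : String → Option String × Option String)
    (L : List α) (init : Option String × Option String) :
    L.foldl (fun r p => if condA p then mk (g p) else r) init
      = match L.foldl (fun m p => if condB p then some (g p) else m) none with
        | some d => mk d
        | none => init := by
  induction L generalizing init with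
  | nil => simp
  | cons p L ih =>
    simp only [List.foldl]
    rw [ih, chooser_acc condB g L (if condB p then some (g p) else none)]
    cases h : L.foldl (fun m p => if condB p then some (g p) else m) none with
    | some d => simp
    | none => rw [hcond p]; cases hb : condB p <;> simp

-- A's forward overwrite sweep computes B's backward scan-with-break
theorem Afold_eq_scanBack (words : List String) (n : Nat) :
    (List.range n).foldl
      (fun res i =>
        pyTriggerDevice.foldl
          (fun res p =>
            if p.2.contains (words.getD i "") || words.getD i "" == p.1 then
              (some (pyCapitalize p.1),
               some (pyCapitalize (PySem.Str.join " "
                 ((words.drop (i + 1)).filter (fun item => !(["is", "the", "really"] : List String).contains item)))))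
            else res)
          res)
      ((none : Option String), (none : Option String))
      = scanBack words n := by
  induction n with
  | zero => simp [scanBack]
  | succ n ih =>
    rw [List.range_succ, List.foldl_append, ih]
    simp only [List.foldl_cons, List.foldl_nil]
    have h := overwrite_eq_lastMatch
      (fun p : String × List String => p.2.contains (words.getD n "") || words.getD n "" == p.1)
      (fun p => words.getD n "" == p.1 || p.2.contains (words.getD n ""))
      (fun p => Bool.or_comm _ _) (fun p => p.1)
      (fun d => (some (pyCapitalize d),
         some (pyCapitalize (PySem.Str.join " "
           ((words.drop (n + 1)).filter (fun x => !(["is", "the", "really"] : List String).contains x))))))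
      pyTriggerDevice (scanBack words n)
    refine h.trans ?_
    rw [scanBack, lastMatch]

-- ===== VERDICT (by name: the statement is the Claim_ definition above) =====
theorem trigger_condition_spec : Claim_equal_trigger_condition := by
  intro command _ hpre
  unfold Spec_trigger_condition trigger_condition trigger_condition_alt
  cases h : PySem.List.pyGet? command (-1) with
  | none =>
    have h2 : command.getLast? = none := by rw [← PySem.List.pyGet?_neg_one]; exact h
    exact absurd (List.getLast?_eq_none_iff.mp h2) hpre
  | some last =>
    simp only []
    by_cases hc : last = "No condition"
    · simp [hc]
    · rw [if_pos hc, if_neg (by simp [hc])]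
      exact Afold_eq_scanBack _ _
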